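-- pv_equiv track=rewrite | github.com/EunsilGil/2--answer | 5차_SolutionCode/5차 2급 1_solution_code.py | solution
-- ===== SOURCE A (Python) =====
-- def solution(ladders, win):
--     answer = 0
--
--     player = [1, 2, 3, 4, 5, 6]
--
--     for e in ladders:
--         temp = player[e[0]-1]
--         player[e[0]-1] = player[e[1]-1]     # 빈칸 채우기
--         player[e[1]-1] = temp               # 빈칸 채우기
--
--     answer = player[win-1]
--     return answer
-- ===== SOURCE B (Python) =====
-- def solution(ladders, win):
--     # Drop a marker on the winning slot and undo the swaps back to the start;
--     # the slot the marker ends on is the player who wins.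
--     mark = [False] * 6
--     mark[win - 1] = True
--     for e in reversed(ladders):
--         mark[e[0] - 1], mark[e[1] - 1] = mark[e[1] - 1], mark[e[0] - 1]
--     return mark.index(True) + 1
-- ===== Notes on version B (the rewrite author's own statement) =====
-- stated objective: alternative
-- what changed: B drops a boolean marker on the winning slot and undoes the swaps in reverse order, returning the index where the marker ends up, instead of simulating the whole six-player list forward; Pre_ excludes only inputs where A raises IndexError.
import Mathlib
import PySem

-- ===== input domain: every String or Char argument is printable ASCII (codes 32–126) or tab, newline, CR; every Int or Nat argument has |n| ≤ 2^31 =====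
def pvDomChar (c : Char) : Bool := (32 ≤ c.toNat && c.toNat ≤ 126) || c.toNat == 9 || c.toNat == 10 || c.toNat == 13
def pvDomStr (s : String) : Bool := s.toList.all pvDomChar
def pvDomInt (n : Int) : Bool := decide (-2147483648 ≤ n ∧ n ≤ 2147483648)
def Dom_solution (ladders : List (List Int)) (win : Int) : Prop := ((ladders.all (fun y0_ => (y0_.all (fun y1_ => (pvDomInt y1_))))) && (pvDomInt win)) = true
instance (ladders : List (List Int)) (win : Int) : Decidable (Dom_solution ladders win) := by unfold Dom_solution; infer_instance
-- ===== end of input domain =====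

-- B drops a marker on the winning slot and undoes the swaps in reverse (boolean marker list + final index search) instead of simulating the six numbered players forward; alternative decomposition, same cost.


-- ===== PORT A =====
-- one swap of A's loop body (temp; two assignments), on the player list
def solStepA (player : List Int) (e : List Int) : List Int :=
  let i0 : Int := PySem.List.pyGetD e 0 0 - 1
  let i1 : Int := PySem.List.pyGetD e 1 0 - 1
  let temp := PySem.List.pyGetD player i0 0
  let player' := PySem.List.pySetD player i0 (PySem.List.pyGetD player i1 0)
  PySem.List.pySetD player' i1 temp

def solution (ladders : List (List Int)) (win : Int) : Int :=
  let player : List Int := [1, 2, 3, 4, 5, 6]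
  let player := ladders.foldl solStepA player
  PySem.List.pyGetD player (win - 1) 0

-- ===== PORT B =====
-- one reversed-loop step of B: the tuple swap on the marker list (both reads, then both writes)
def solStepB (mark : List Bool) (e : List Int) : List Bool :=
  let i0 : Int := PySem.List.pyGetD e 0 0 - 1
  let i1 : Int := PySem.List.pyGetD e 1 0 - 1
  let v0 := PySem.List.pyGetD mark i1 false
  let v1 := PySem.List.pyGetD mark i0 false
  PySem.List.pySetD (PySem.List.pySetD mark i0 v0) i1 v1

def solution_alt (ladders : List (List Int)) (win : Int) : Int :=
  let mark := PySem.List.pySetD (List.replicate 6 false) (win - 1) true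
  let mark := ladders.reverse.foldl solStepB mark
  (((PySem.List.index? mark true).getD 0 : Nat) : Int) + 1

-- ===== PRECONDITION & SPEC =====
-- Pre_ excludes exactly the inputs where the Python A raises an IndexError: a ladder shorter
-- than two entries, or an index e[0]-1, e[1]-1 or win-1 outside Python's range for a 6-list.
def Pre_solution (ladders : List (List Int)) (win : Int) : Prop :=
  (∀ e ∈ ladders, 2 ≤ e.length ∧
      (-5 ≤ e.getD 0 0 ∧ e.getD 0 0 ≤ 6) ∧ (-5 ≤ e.getD 1 0 ∧ e.getD 1 0 ≤ 6)) ∧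
  (-5 ≤ win ∧ win ≤ 6)
instance (ladders : List (List Int)) (win : Int) : Decidable (Pre_solution ladders win) := by unfold Pre_solution; infer_instance

def pvWitness_solution : List (List Int) × Int := ([[1, 4], [3, 4], [-1, 2]], 4)

def Spec_solution (ladders : List (List Int)) (win : Int) (out : Int) : Prop := out = solution_alt ladders win
instance (ladders : List (List Int)) (win : Int) (out : Int) : Decidable (Spec_solution ladders win out) := by unfold Spec_solution; infer_instance

-- ===== CLAIM (what is proved, stated in full; the proofs are below) =====
def Claim_equal_solution : Prop := ∀ (ladders : List (List Int)) (win : Int), Dom_solution ladders win → Pre_solution ladders win → Spec_solution ladders win (solution ladders win)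

-- ===== LEMMAS AND PROOFS =====

-- Python's negative-index normalisation for a list of six slots
def normIdx6 (i : Int) : Int := if i < 0 then i + 6 else i

-- proof-side scalar trace: where the marker (resp. the traced slot) moves under one swap
def stepT (pos : Int) (e : List Int) : Int :=
  let i0 := normIdx6 (PySem.List.pyGetD e 0 0 - 1)
  let i1 := normIdx6 (PySem.List.pyGetD e 1 0 - 1)
  if pos = i0 then i1 else if pos = i1 then i0 else pos

-- reading a valid (possibly negative) Python index on a 6-list is reading its normalisation
theorem pyGetD_normIdx6 {α : Type} (xs : List α) (i : Int) (d : α) (h6 : xs.length = 6)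
    (hlo : -6 ≤ i) (hhi : i < 6) :
    PySem.List.pyGetD xs i d = PySem.List.pyGetD xs (normIdx6 i) d := by
  unfold normIdx6
  split_ifs with hneg
  · have hk : i = -(((-i).toNat : Nat) : Int) := by omega
    have h1 : (0:Nat) < (-i).toNat := by omega
    have h2 : (-i).toNat ≤ xs.length := by omega
    rw [hk, PySem.List.pyGetD_neg_natCast xs _ d h1 h2]
    have : i + 6 = ((xs.length - (-i).toNat : Nat) : Int) := by omega
    rw [show -(((-i).toNat : Nat) : Int) + 6 = ((xs.length - (-i).toNat : Nat) : Int) by omega,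
        PySem.List.pyGetD_natCast]
    simp [List.getD_eq_getElem?_getD, List.getElem?_eq_getElem (by omega : xs.length - (-i).toNat < xs.length)]
  · rfl

theorem pySetD_normIdx6 {α : Type} (xs : List α) (i : Int) (v : α) (h6 : xs.length = 6)
    (hlo : -6 ≤ i) (hhi : i < 6) :
    PySem.List.pySetD xs i v = xs.set (normIdx6 i).toNat v := by
  unfold normIdx6
  split_ifs with hneg
  · unfold PySem.List.pySetD PySem.List.pySet? PySem.List.pyIdx?
    have hn : ¬ (0 ≤ i) := by omega
    have hm : -(xs.length : Int) ≤ i := by omega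
    simp only [hn, if_false, hm, if_pos, Option.map_some, Option.getD_some]
    congr 1
    omega
  · rw [PySem.List.pySetD_of_nonneg xs v (by omega)]

theorem length_stepA (player e : List Int) : (solStepA player e).length = player.length := by
  unfold solStepA
  simp [PySem.List.length_pySetD]

-- a valid e: both indices land in [0,6) after normalisation
def validE (e : List Int) : Prop :=
  2 ≤ e.length ∧ (-5 ≤ e.getD 0 0 ∧ e.getD 0 0 ≤ 6) ∧ (-5 ≤ e.getD 1 0 ∧ e.getD 1 0 ≤ 6)

theorem normIdx6_range (i : Int) (hlo : -6 ≤ i) (hhi : i < 6) :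
    0 ≤ normIdx6 i ∧ normIdx6 i < 6 := by unfold normIdx6; split_ifs <;> omega

theorem stepT_range (pos : Int) (e : List Int) (he : validE e)
    (h : 0 ≤ pos ∧ pos < 6) : 0 ≤ stepT pos e ∧ stepT pos e < 6 := by
  obtain ⟨hl, ⟨h0a, h0b⟩, ⟨h1a, h1b⟩⟩ := he
  unfold stepT
  have g0 : PySem.List.pyGetD e 0 0 = e.getD 0 0 := by
    simpa using PySem.List.pyGetD_natCast (n := 0) (xs := e) (d := 0)
  have g1 : PySem.List.pyGetD e 1 0 = e.getD 1 0 := by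
    simpa using PySem.List.pyGetD_natCast (n := 1) (xs := e) (d := 0)
  have r0 := normIdx6_range (e.getD 0 0 - 1) (by omega) (by omega)
  have r1 := normIdx6_range (e.getD 1 0 - 1) (by omega) (by omega)
  simp only [g0, g1]
  split_ifs <;> omega

-- A-side single-swap transfer: reading slot q of the swapped list = reading the traced-back slot of the original
theorem step_transfer (player : List Int) (e : List Int) (q : Int)
    (h6 : player.length = 6) (he : validE e) (hq : 0 ≤ q ∧ q < 6) :
    PySem.List.pyGetD (solStepA player e) q 0 = PySem.List.pyGetD player (stepT q e) 0 := by
  obtain ⟨hl, ⟨h0a, h0b⟩, ⟨h1a, h1b⟩⟩ := he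
  unfold solStepA stepT
  have g0 : PySem.List.pyGetD e 0 0 = e.getD 0 0 := by
    simpa using PySem.List.pyGetD_natCast (n := 0) (xs := e) (d := 0)
  have g1 : PySem.List.pyGetD e 1 0 = e.getD 1 0 := by
    simpa using PySem.List.pyGetD_natCast (n := 1) (xs := e) (d := 0)
  simp only [g0, g1]
  set a := e.getD 0 0 - 1 with ha
  set b := e.getD 1 0 - 1 with hb
  have r0 := normIdx6_range a (by omega) (by omega)
  have r1 := normIdx6_range b (by omega) (by omega)
  rw [pyGetD_normIdx6 player a 0 h6 (by omega) (by omega),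
      pyGetD_normIdx6 player b 0 h6 (by omega) (by omega),
      pySetD_normIdx6 player a _ h6 (by omega) (by omega)]
  rw [pySetD_normIdx6 _ b _ (by simp [h6]) (by omega) (by omega)]
  set na := (normIdx6 a).toNat with hna
  set nb := (normIdx6 b).toNat with hnb
  have hna6 : na < 6 := by omega
  have hnb6 : nb < 6 := by omega
  have hq6 : q.toNat < 6 := by omega
  have hlen : ((player.set na (PySem.List.pyGetD player (normIdx6 b) 0)).set nb
      (PySem.List.pyGetD player (normIdx6 a) 0)).length = 6 := by simp [h6]
  rw [PySem.List.pyGetD_eq_getElem _ 0 (by omega) (by rw [hlen]; omega)]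
  split_ifs with hqa hqb
  · by_cases hab : na = nb
    · have hqv : q.toNat = nb := by omega
      have hn : normIdx6 a = normIdx6 b := by omega
      simp [hqv, hn]
    · have hqna : q.toNat = na := by omega
      simp [List.getElem_set, hqna]
      intro h
      exact absurd h.symm hab
  · have hqnb : q.toNat = nb := by omega
    simp [hqnb]
  · have h1 : nb ≠ q.toNat := by omega
    have h2 : na ≠ q.toNat := by omega
    simp [h1, h2,
      PySem.List.pyGetD_eq_getElem player 0 hq.1 (by omega : q < (player.length : Int))]

theorem foldT_range (ladders : List (List Int)) (pos : Int)
    (hv : ∀ e ∈ ladders, validE e) (h : 0 ≤ pos ∧ pos < 6) :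
    0 ≤ ladders.foldl stepT pos ∧ ladders.foldl stepT pos < 6 := by
  induction ladders generalizing pos with
  | nil => exact h
  | cons e ls ih =>
      exact ih (stepT pos e) (fun x hx => hv x (List.mem_cons_of_mem _ hx))
        (stepT_range pos e (hv e (List.mem_cons_self)) h)

-- A-side invariant: reading slot pos after all forward swaps = reading the backward-traced slot originally
theorem fold_transfer : ∀ (ladders : List (List Int)) (player : List Int) (pos : Int),
    player.length = 6 → (∀ e ∈ ladders, validE e) → (0 ≤ pos ∧ pos < 6) →
    PySem.List.pyGetD (ladders.foldl solStepA player) pos 0 =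
      PySem.List.pyGetD player (ladders.reverse.foldl stepT pos) 0 := by
  intro ladders
  induction ladders with
  | nil => intro player pos _ _ _; simp
  | cons e ls ih =>
      intro player pos h6 hv hp
      have hve : validE e := hv e (List.mem_cons_self)
      have hvl : ∀ x ∈ ls, validE x := fun x hx => hv x (List.mem_cons_of_mem _ hx)
      have h6' : (solStepA player e).length = 6 := by rw [length_stepA]; exact h6
      calc PySem.List.pyGetD ((e :: ls).foldl solStepA player) pos 0
          = PySem.List.pyGetD (solStepA player e) (ls.reverse.foldl stepT pos) 0 := by
            simpa using ih (solStepA player e) pos h6' hvl hp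
        _ = PySem.List.pyGetD player (stepT (ls.reverse.foldl stepT pos) e) 0 := by
            exact step_transfer player e _ h6 hve
              (foldT_range ls.reverse pos (by simpa using hvl) hp)
        _ = PySem.List.pyGetD player ((e :: ls).reverse.foldl stepT pos) 0 := by
            simp [List.foldl_append]

-- the initial list holds q+1 at every slot q in [0,6)
theorem init_read (q : Int) (h : 0 ≤ q ∧ q < 6) :
    PySem.List.pyGetD ([1, 2, 3, 4, 5, 6] : List Int) q 0 = q + 1 := by
  have h1 : q = 0 ∨ q = 1 ∨ q = 2 ∨ q = 3 ∨ q = 4 ∨ q = 5 := by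
    omega
  rcases h1 with h | h | h | h | h | h <;> subst h <;> decide

-- ---- B side: the marker list is always a unit vector, moved by the scalar trace ----

-- the unit marker: True exactly at slot p
def unitMark (p : Int) : List Bool := (List.replicate 6 false).set p.toNat true

theorem getElem_eq_getD (xs : List Bool) (k : Nat) (h : k < xs.length) :
    xs[k] = xs.getD k false := by
  simp [List.getD_eq_getElem?_getD, List.getElem?_eq_getElem h]

-- the tuple swap moves a unit marker by the transposition (checked over all 216 index triples)
theorem unit_swap (p a b : Fin 6) :
    (((List.replicate 6 false).set p.val true).set a.val
        (((List.replicate 6 false).set p.val true).getD b.val false)).set b.val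
        (((List.replicate 6 false).set p.val true).getD a.val false)
      = (List.replicate 6 false).set
          (if p.val = a.val then b.val else if p.val = b.val then a.val else p.val) true := by
  revert p a b
  decide

theorem stepB_unit (e : List Int) (he : validE e) (p : Int) (hp : 0 ≤ p ∧ p < 6) :
    solStepB (unitMark p) e = unitMark (stepT p e) := by
  obtain ⟨hl, ⟨h0a, h0b⟩, ⟨h1a, h1b⟩⟩ := he
  unfold solStepB stepT unitMark
  have g0 : PySem.List.pyGetD e 0 0 = e.getD 0 0 := by
    simpa using PySem.List.pyGetD_natCast (n := 0) (xs := e) (d := 0)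
  have g1 : PySem.List.pyGetD e 1 0 = e.getD 1 0 := by
    simpa using PySem.List.pyGetD_natCast (n := 1) (xs := e) (d := 0)
  simp only [g0, g1]
  set a := e.getD 0 0 - 1 with ha
  set b := e.getD 1 0 - 1 with hb
  have r0 := normIdx6_range a (by omega) (by omega)
  have r1 := normIdx6_range b (by omega) (by omega)
  have hm6 : ((List.replicate 6 false).set p.toNat true).length = 6 := by simp
  rw [pyGetD_normIdx6 _ a false hm6 (by omega) (by omega),
      pyGetD_normIdx6 _ b false hm6 (by omega) (by omega),
      pySetD_normIdx6 _ a _ hm6 (by omega) (by omega)]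
  rw [pySetD_normIdx6 _ b _ (by simp) (by omega) (by omega)]
  rw [PySem.List.pyGetD_eq_getElem _ false (by omega) (by rw [hm6]; omega),
      PySem.List.pyGetD_eq_getElem _ false (by omega) (by rw [hm6]; omega)]
  rw [getElem_eq_getD _ _ (by rw [hm6]; omega), getElem_eq_getD _ _ (by rw [hm6]; omega)]
  have h := unit_swap ⟨p.toNat, by omega⟩ ⟨(normIdx6 a).toNat, by omega⟩ ⟨(normIdx6 b).toNat, by omega⟩
  simp only [] at h
  rw [h]
  congr 1
  split_ifs with h1 h2 h3 h4 h5 <;> omega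

theorem foldB_unit (ladders : List (List Int)) (p : Int)
    (hv : ∀ e ∈ ladders, validE e) (hp : 0 ≤ p ∧ p < 6) :
    ladders.foldl solStepB (unitMark p) = unitMark (ladders.foldl stepT p) := by
  induction ladders generalizing p with
  | nil => rfl
  | cons e ls ih =>
      rw [List.foldl_cons, List.foldl_cons,
          stepB_unit e (hv e (List.mem_cons_self)) p hp]
      exact ih _ (fun x hx => hv x (List.mem_cons_of_mem _ hx))
        (stepT_range p e (hv e (List.mem_cons_self)) hp)

-- the index of the marker in a unit vector is its slot
theorem index_unit (p : Int) (hp : 0 ≤ p ∧ p < 6) :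
    PySem.List.index? (unitMark p) true = some p.toNat := by
  have h1 : p = 0 ∨ p = 1 ∨ p = 2 ∨ p = 3 ∨ p = 4 ∨ p = 5 := by omega
  rcases h1 with h | h | h | h | h | h <;> subst h <;> decide

-- ===== VERDICT (by name: the statement is the Claim_ definition above) =====
theorem solution_spec : Claim_equal_solution := by
  intro ladders win _hdom hpre
  obtain ⟨hv, hw1, hw2⟩ := hpre
  have hA : solution ladders win
      = PySem.List.pyGetD (ladders.foldl solStepA [1, 2, 3, 4, 5, 6]) (win - 1) 0 := rfl
  have hB : solution_alt ladders win
      = (((PySem.List.index? (ladders.reverse.foldl solStepB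
            (PySem.List.pySetD (List.replicate 6 false) (win - 1) true)) true).getD 0 : Nat) : Int) + 1 := rfl
  show solution ladders win = solution_alt ladders win
  rw [hA, hB]
  have hv' : ∀ e ∈ ladders, validE e := fun e he => hv e he
  have hv'' : ∀ e ∈ ladders.reverse, validE e := by simpa using hv'
  have h6 : (ladders.foldl solStepA [1, 2, 3, 4, 5, 6]).length = 6 := by
    have : ∀ (ls : List (List Int)) (pl : List Int),
        (ls.foldl solStepA pl).length = pl.length := by
      intro ls
      induction ls with
      | nil => intro pl; rfl
      | cons e t ih => intro pl; rw [List.foldl_cons, ih, length_stepA]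
    rw [this]
    rfl
  have r := normIdx6_range (win - 1) (by omega) (by omega)
  have rt := foldT_range ladders.reverse (normIdx6 (win - 1)) hv'' ⟨r.1, r.2⟩
  rw [pyGetD_normIdx6 _ (win - 1) 0 h6 (by omega) (by omega),
      fold_transfer ladders _ _ (by rfl) hv' ⟨r.1, r.2⟩,
      init_read _ rt,
      pySetD_normIdx6 (List.replicate 6 false) (win - 1) true (by simp) (by omega) (by omega)]
  rw [show (List.replicate 6 false).set (normIdx6 (win - 1)).toNat true
        = unitMark (normIdx6 (win - 1)) from rfl,
      foldB_unit ladders.reverse _ hv'' ⟨r.1, r.2⟩,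
      index_unit _ rt]
  simp only [Option.getD_some]
  omega
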